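-- pv_equiv track=rewrite | github.com/alexandraback/datacollection | solutions_5669245564223488_1/Python/lkj/B.py | mergesubsl
-- ===== SOURCE A (Python) =====
-- from math import factorial
--
-- def mergesubsl(subsl, a):
--     if len(subsl) == 0:
--         return (1, '')
--     elif len(subsl) == 1:
--         #CHECK NEEDED!!!
--         ap = True
--         s = subsl[0]
--         poss = 1
--         for i in range(s.find(a), len(s)-1):
--             if ap and s[i+1] != a:
--                 ap = False
--             elif not ap and s[i+1] == a:
--                 poss = 0
--                 break
--         if poss == 0:
--             return (0, '')
--         return (1, subsl[0])
--
--     cna = 0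
--     begin = ''
--     end = ''
--     for i in subsl:
--         if len(set(i)) != 1:
--             cna += 1
--             if i[-1] == a:
--                 begin = i
--             elif i[0] == a:
--                 end = i
--     if cna > 2:
--         poss = 0
--         s = ''
--     else:
--         poss = factorial(len(subsl)-cna)
--         s = begin
--         if begin != '':
--             subsl.remove(begin)
--         if end != '':
--             subsl.remove(end)
--         for i in subsl:
--             s += i
--         s += end
--         #check needed
--         ap = True
--         for i in range(s.find(a), len(s)-1):
--             if ap and s[i+1] != a:
--                 ap = False
--             elif not ap and s[i+1] == a:
--                 poss = 0
--                 break
--     if poss == 0: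
--         return (0, '')
--     return (poss, s)
-- ===== SOURCE B (Python) =====
-- from math import factorial
--
-- def _runs(s, c):
--     # number of maximal runs of the character c in s, counted pairwise
--     return (1 if s[:1] == c else 0) + sum(1 for x, y in zip(s, s[1:]) if x != c and y == c)
--
-- def mergesubsl(subsl, a):
--     n = len(subsl)
--     if n == 0:
--         return (1, '')
--     if n == 1:
--         ok = len(a) != 1 or _runs(subsl[0], a) <= 1
--         return (1, subsl[0]) if ok else (0, '')
--     cna = 0
--     bi = ei = -1
--     for j, w in enumerate(subsl):
--         if len(set(w)) != 1:
--             cna += 1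
--             if w[-1] == a:
--                 bi = j
--             elif w[0] == a:
--                 ei = j
--     if cna > 2:
--         return (0, '')
--     s = (subsl[bi] if bi >= 0 else '') \
--         + ''.join(w for j, w in enumerate(subsl) if j != bi and j != ei) \
--         + (subsl[ei] if ei >= 0 else '')
--     if len(a) == 1 and _runs(s, a) > 1:
--         return (0, '')
--     return (factorial(n - cna), s)
-- ===== Notes on version B (the rewrite author's own statement) =====
-- stated objective: alternative
-- what changed: B replaces A's two break-out state-machine contiguity scans by a pairwise run count (head test + count of non-a/a adjacent pairs, valid iff at most one run), and replaces A's value-based begin/end selection with in-place list mutation (remove) by a single indexed pass recording the last qualifying indices bi/ei and an index-filtered join; the duplicate-candidate corner still agrees because any arrangement with two like candidates fails the run test. Pre_ excludes lists of length >= 2 containing '', on which A raises IndexError (B raises there too). A mutates subsl in place; …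
import Mathlib
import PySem

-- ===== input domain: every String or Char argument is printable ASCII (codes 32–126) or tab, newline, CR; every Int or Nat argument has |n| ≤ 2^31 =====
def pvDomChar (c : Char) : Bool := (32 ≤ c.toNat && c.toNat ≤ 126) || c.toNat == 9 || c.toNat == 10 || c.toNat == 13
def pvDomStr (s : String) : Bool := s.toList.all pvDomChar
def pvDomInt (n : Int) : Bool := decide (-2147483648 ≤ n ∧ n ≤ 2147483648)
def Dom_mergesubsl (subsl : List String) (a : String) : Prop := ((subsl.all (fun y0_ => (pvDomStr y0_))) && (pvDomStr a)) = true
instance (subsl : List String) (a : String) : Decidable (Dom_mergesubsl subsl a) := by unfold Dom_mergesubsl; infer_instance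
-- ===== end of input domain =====

-- B replaces A's two state-machine contiguity scans by a pairwise run count and A's
-- value-based begin/end selection + in-place remove by an indexed pass with an
-- index-filtered join (alternative decomposition, same cost).
-- A mutates subsl in place (remove); the equivalence proved is about the RETURN value only.

-- ===== PORT A =====
-- A's contiguity scan `for i in range(s.find(a), len(s)-1): ...` (the identical loop appears
-- twice in A; it is one helper here), threading the Python state (ap, poss).
def pvScanA (s a : List Char) : List Int → Bool → Int → Int
  | [], _, poss => poss
  | i :: rest, ap, poss =>
    match PySem.List.pyGet? s (i + 1) with
    | none => poss          -- unreachable: i+1 is always a valid index for this range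
    | some c =>
      if ap && !([c] == a) then pvScanA s a rest false poss
      else if !ap && ([c] == a) then 0
      else pvScanA s a rest ap poss

-- A's `for i in subsl:` loop accumulating (cna, begin, end).
def pvAbe (al : List Char) : List String → Int × String × String → Int × String × String
  | [], st => st
  | i :: rest, (cna, b, e) =>
    if (PySem.Set.ofList i.toList).length != 1 then
      match PySem.List.pyGet? i.toList (-1) with
      | none => pvAbe al rest (cna + 1, b, e)   -- Python raises IndexError here (i = ''); excluded by Pre_
      | some last =>
        if [last] == al then pvAbe al rest (cna + 1, i, e)
        else
          match PySem.List.pyGet? i.toList 0 with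
          | none => pvAbe al rest (cna + 1, b, e)   -- unreachable: i is nonempty
          | some first =>
            if [first] == al then pvAbe al rest (cna + 1, b, i)
            else pvAbe al rest (cna + 1, b, e)
    else pvAbe al rest (cna, b, e)

def mergesubsl (subsl : List String) (a : String) : Int × String :=
  if subsl.length = 0 then (1, "")
  else if subsl.length = 1 then
    let s := (subsl.headD "").toList
    let poss : Int := 1
    let poss := pvScanA s a.toList (PySem.List.pyRange (PySem.Chars.find s a.toList) ((s.length : Int) - 1)) true poss
    if poss = 0 then (0, "") else (1, subsl.headD "")
  else
    match pvAbe a.toList subsl (0, "", "") with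
    | (cna, b, e) =>
      if cna > 2 then (0, "")
      else
        let poss : Int := (((subsl.length : Int) - cna).toNat.factorial : Int)
        -- subsl.remove(begin) / subsl.remove(end); the element is present, so getD never fires
        let l1 := if b ≠ "" then (PySem.List.remove? subsl b).getD subsl else subsl
        let l2 := if e ≠ "" then (PySem.List.remove? l1 e).getD l1 else l1
        let s := l2.foldl (fun acc i => acc ++ i.toList) b.toList ++ e.toList
        let poss := pvScanA s a.toList (PySem.List.pyRange (PySem.Chars.find s a.toList) ((s.length : Int) - 1)) true poss
        if poss = 0 then (0, "") else (poss, String.ofList s)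

-- ===== PORT B =====
-- B's helper _runs(s, c): head test + count of (non-c, c) adjacent pairs via zip
def pvRunsB (s : List Char) (al : List Char) : Nat :=
  (if PySem.List.slice s none (some 1) == al then 1 else 0)
  + (s.zip (s.drop 1)).countP (fun p => !([p.1] == al) && ([p.2] == al))

-- B's single `for j, w in enumerate(subsl):` pass accumulating (cna, bi, ei).
def pvIdxScan (al : List Char) : List (Int × String) → Int × Int × Int → Int × Int × Int
  | [], st => st
  | (j, w) :: rest, (cna, bi, ei) =>
    if (PySem.Set.ofList w.toList).length != 1 then
      match PySem.List.pyGet? w.toList (-1) with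
      | none => pvIdxScan al rest (cna + 1, bi, ei)   -- Python raises IndexError here (w = ''); excluded by Pre_
      | some last =>
        if [last] == al then pvIdxScan al rest (cna + 1, j, ei)
        else
          match PySem.List.pyGet? w.toList 0 with
          | none => pvIdxScan al rest (cna + 1, bi, ei)   -- unreachable: w is nonempty
          | some first =>
            if [first] == al then pvIdxScan al rest (cna + 1, bi, j)
            else pvIdxScan al rest (cna + 1, bi, ei)
    else pvIdxScan al rest (cna, bi, ei)

def mergesubsl_alt (subsl : List String) (a : String) : Int × String :=
  let n := subsl.length
  if n = 0 then (1, "")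
  else if n = 1 then
    if a.toList.length ≠ 1 ∨ pvRunsB (subsl.headD "").toList a.toList ≤ 1
    then (1, subsl.headD "") else (0, "")
  else
    let al := a.toList
    match pvIdxScan al (PySem.List.enumerate subsl 0) (0, -1, -1) with
    | (cna, bi, ei) =>
      if cna > 2 then (0, "")
      else
        let mid := ((PySem.List.enumerate subsl 0).filter
                      (fun p => !(p.1 == bi) && !(p.1 == ei))).map (·.2)
        let s := (if bi ≥ 0 then ((PySem.List.pyGet? subsl bi).getD "").toList else [])
                 ++ PySem.Chars.join [] (mid.map (·.toList))
                 ++ (if ei ≥ 0 then ((PySem.List.pyGet? subsl ei).getD "").toList else [])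
        if al.length = 1 ∧ pvRunsB s al > 1 then (0, "")
        else (((n : Int) - cna).toNat.factorial, String.ofList s)

-- ===== PRECONDITION & SPEC =====
-- Pre_ excludes exactly the inputs where the Python A raises: a list of length ≥ 2
-- containing the empty string makes A evaluate ''[-1] (IndexError); B raises there too.
def Pre_mergesubsl (subsl : List String) (a : String) : Prop := 2 ≤ subsl.length → "" ∉ subsl
instance (subsl : List String) (a : String) : Decidable (Pre_mergesubsl subsl a) := by unfold Pre_mergesubsl; infer_instance
def pvWitness_mergesubsl : List String × String := (["ab", "cd"], "a")
def Spec_mergesubsl (subsl : List String) (a : String) (out : Int × String) : Prop := out = mergesubsl_alt subsl a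
instance (subsl : List String) (a : String) (out : Int × String) : Decidable (Spec_mergesubsl subsl a out) := by unfold Spec_mergesubsl; infer_instance

-- ===== CLAIM (what is proved, stated in full; the proofs are below) =====
def Claim_equal_mergesubsl : Prop := ∀ (subsl : List String) (a : String), Dom_mergesubsl subsl a → Pre_mergesubsl subsl a → Spec_mergesubsl subsl a (mergesubsl subsl a)

-- ===== LEMMAS AND PROOFS =====

-- w[-1] == a  (False where Python would raise)
def pvLastIs (w : String) (al : List Char) : Bool :=
  match PySem.List.pyGet? w.toList (-1) with
  | some c => [c] == al
  | none => false

-- w[0] == a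
def pvFirstIs (w : String) (al : List Char) : Bool :=
  match PySem.List.pyGet? w.toList 0 with
  | some c => [c] == al
  | none => false

def pvMixed (w : String) : Bool := (PySem.Set.ofList w.toList).length != 1

-- proof-side run counter: number of maximal runs of c, `prev` = "previous char was c"
def pvRunsR (c : Char) : List Char → Bool → Nat
  | [], _ => 0
  | x :: xs, prev =>
    if x = c then (if prev then 0 else 1) + pvRunsR c xs true
    else pvRunsR c xs false

-- flag after processing u, starting from prev
def pvLastFlag (c : Char) (u : List Char) (prev : Bool) : Bool :=
  match u.getLast? with
  | none => prev
  | some x => x == c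

theorem pvLastFlag_cons (c x : Char) (u : List Char) (prev : Bool) :
    pvLastFlag c (x :: u) prev = pvLastFlag c u (x == c) := by
  cases u with
  | nil => simp [pvLastFlag]
  | cons y v =>
    unfold pvLastFlag
    cases h : (y :: v).getLast? with
    | none => simp at h
    | some z =>
      have h2 : (x :: y :: v).getLast? = some z := by
        rw [List.getLast?_cons_cons]; exact h
      rw [h2]

theorem pvRunsR_append (c : Char) (u v : List Char) : ∀ (prev : Bool),
    pvRunsR c (u ++ v) prev = pvRunsR c u prev + pvRunsR c v (pvLastFlag c u prev) := by
  induction u with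
  | nil => intro prev; simp [pvRunsR, pvLastFlag]
  | cons x xs ih =>
    intro prev
    by_cases hx : x = c
    · subst hx
      simp [pvRunsR, ih, pvLastFlag_cons, Nat.add_assoc]
    · have hb : (x == c) = false := by simpa using hx
      simp [pvRunsR, hx, ih, pvLastFlag_cons, hb]

theorem pvRunsR_false_eq_zero_iff (c : Char) (l : List Char) :
    pvRunsR c l false = 0 ↔ c ∉ l := by
  induction l with
  | nil => simp [pvRunsR]
  | cons x xs ih =>
    by_cases hx : x = c
    · subst hx; simp [pvRunsR]
    · constructor
      · intro h0 hm
        rcases List.mem_cons.mp hm with h | h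
        · exact hx h.symm
        · have h0' : pvRunsR c xs false = 0 := by simpa [pvRunsR, hx] using h0
          exact (ih.mp h0') h
      · intro hm
        have : c ∉ xs := fun h => hm (List.mem_cons_of_mem _ h)
        simpa [pvRunsR, hx] using ih.mpr this

theorem pvRunsR_pos_of_mem (c : Char) (l : List Char) (h : c ∈ l) :
    1 ≤ pvRunsR c l false := by
  rcases Nat.eq_zero_or_pos (pvRunsR c l false) with h0 | h1
  · exact absurd h ((pvRunsR_false_eq_zero_iff c l).mp h0)
  · exact h1

theorem pvRunsR_prefix (c : Char) (u v : List Char) (h : c ∉ u) :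
    pvRunsR c (u ++ v) false = pvRunsR c v false := by
  induction u with
  | nil => rfl
  | cons x xs ih =>
    have hx : x ≠ c := fun hc => h (hc ▸ List.mem_cons_self)
    simp only [List.cons_append, pvRunsR, if_neg hx]
    exact ih (fun hm => h (List.mem_cons_of_mem _ hm))


theorem pvZip_count (c : Char) (l : List Char) : ∀ (x : Char),
    ((x :: l).zip l).countP (fun p => !([p.1] == [c]) && ([p.2] == [c])) = pvRunsR c l (x == c) := by
  induction l with
  | nil => intro x; simp [pvRunsR]
  | cons y r ih =>
    intro x
    have hz : ((x :: y :: r).zip (y :: r)) = (x, y) :: ((y :: r).zip r) := rfl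
    rw [hz, List.countP_cons, ih y]
    have hpair : ∀ u v : Char, ([u] == [v]) = (u == v) := by
      intro u v; cases h : u == v <;> simp_all
    by_cases hy : y = c
    · subst hy
      by_cases hx : x = y
      · subst hx; simp [pvRunsR]
      · have hxb : (x == y) = false := by simpa using hx
        simp [pvRunsR, hpair, hxb, Nat.add_comm]
    · have hyb : (y == c) = false := by simpa using hy
      by_cases hx : x = c
      · subst hx; simp [pvRunsR, hy, hpair, hyb]
      · have hxb : (x == c) = false := by simpa using hx
        simp [pvRunsR, hy, hpair, hyb, hxb]

theorem pvRunsB_eq (c : Char) (s : List Char) : pvRunsB s [c] = pvRunsR c s false := by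
  cases s with
  | nil =>
    have h0 : PySem.List.slice ([] : List Char) none (some 1) = [] := by
      rw [PySem.List.slice_to _ (by omega)]; rfl
    simp [pvRunsB, pvRunsR, h0]
  | cons x l =>
    have hs : PySem.List.slice (x :: l) none (some 1) = [x] := by
      rw [PySem.List.slice_to _ (by omega)]
      rfl
    have hd : (x :: l).drop 1 = l := rfl
    rw [pvRunsB, hs, hd, pvZip_count]
    by_cases hx : x = c
    · subst hx; simp [pvRunsR]
    · have : (x == c) = false := by simpa using hx
      simp [pvRunsR, hx, this]

-- proof-side pure state machine over the characters A's scan visits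
def pvMach (c : Char) : List Char → Bool → Bool
  | [], _ => true
  | x :: r, ap =>
    if ap && !(x == c) then pvMach c r false
    else if !ap && (x == c) then false
    else pvMach c r ap

theorem pvScanA_of_len_ne_one (s a : List Char) (h : a.length ≠ 1) :
    ∀ (idxs : List Int) (ap : Bool) (poss : Int), pvScanA s a idxs ap poss = poss := by
  intro idxs
  induction idxs with
  | nil => intro ap poss; simp [pvScanA]
  | cons i rest ih =>
    intro ap poss
    have hne : ∀ c : Char, ([c] == a) = false := by
      intro c
      rw [beq_eq_false_iff_ne]
      intro hc; apply h; rw [← hc]; rfl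
    cases hg : PySem.List.pyGet? s (i + 1) with
    | none => simp [pvScanA, hg]
    | some c => cases ap <;> simp [pvScanA, hg, hne, ih]

theorem pvScanA_eq_mach (s : List Char) (c : Char) :
    ∀ (j : Nat), j ≤ s.length → ∀ (ap : Bool) (poss : Int),
      pvScanA s [c] (PySem.List.pyRange ((j : Int) - 1) ((s.length : Int) - 1)) ap poss
        = if pvMach c (s.drop j) ap then poss else 0 := by
  intro j
  induction hn : s.length - j generalizing j with
  | zero =>
    intro hj ap poss
    have hj' : j = s.length := by omega
    subst hj'
    have hempty : PySem.List.pyRange ((s.length : Int) - 1) ((s.length : Int) - 1) = [] := by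
      simp [pysem]
    rw [hempty]
    simp [pvScanA, List.drop_length, pvMach]
  | succ n ih =>
    intro hj ap poss
    have hlt : j < s.length := by omega
    have hcons : PySem.List.pyRange ((j : Int) - 1) ((s.length : Int) - 1)
        = ((j : Int) - 1) :: PySem.List.pyRange ((j : Int) - 1 + 1) ((s.length : Int) - 1) := by
      exact PySem.List.pyRange_one_cons (by omega)
    have hget : PySem.List.pyGet? s ((j : Int) - 1 + 1) = some s[j] := by
      have : ((j : Int) - 1 + 1) = (j : Int) := by ring
      rw [this, PySem.List.pyGet?_natCast, List.getElem?_eq_getElem hlt]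
    have hdrop : s.drop j = s[j] :: s.drop (j + 1) := (List.getElem_cons_drop hlt).symm
    rw [hcons]
    show (match PySem.List.pyGet? s ((j:Int) - 1 + 1) with
      | none => poss
      | some c' =>
        if ap && !([c'] == [c]) then pvScanA s [c] (PySem.List.pyRange ((j:Int) - 1 + 1) ((s.length:Int)-1)) false poss
        else if !ap && ([c'] == [c]) then 0
        else pvScanA s [c] (PySem.List.pyRange ((j:Int) - 1 + 1) ((s.length:Int)-1)) ap poss) = _
    rw [hget, hdrop]
    have hidx2 : ((j : Int) - 1 + 1) = (j : Int) := by ring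
    rw [hidx2]
    have ih' := fun ap poss => ih (j + 1) (by omega) (by omega) ap poss
    rw [show (((j + 1 : Nat) : Int) - 1) = (j : Int) by push_cast; ring] at ih'
    have hbeq : ([s[j]] == [c]) = (s[j] == c) := by
      cases h : s[j] == c <;> simp_all
    by_cases hx : s[j] = c
    · have hb : (s[j] == c) = true := by simp [hx]
      cases ap <;> simp [pvMach, hbeq, hb, ih']
    · have hb : (s[j] == c) = false := by simp [hx]
      cases ap <;> simp [pvMach, hbeq, hb, ih']

theorem pvMach_of_not_mem (c : Char) (l : List Char) (h : c ∉ l) : ∀ ap, pvMach c l ap = true := by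
  induction l with
  | nil => intro ap; rfl
  | cons x r ih =>
    intro ap
    have hx : (x == c) = false := by
      rw [beq_eq_false_iff_ne]; rintro rfl; exact h (List.mem_cons_self)
    have hr := ih (fun hm => h (List.mem_cons_of_mem _ hm))
    cases ap <;> simp [pvMach, hx, hr]

theorem pvMach_false (c : Char) (l : List Char) : pvMach c l false = !(l.contains c) := by
  induction l with
  | nil => simp [pvMach]
  | cons x r ih =>
    by_cases hx : x = c
    · subst hx; simp [pvMach]
    · have : (x == c) = false := by rwa [beq_eq_false_iff_ne]
      simp [pvMach, this, ih, Ne.symm hx]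

theorem pvMach_true_runs (c : Char) (l : List Char) :
    pvMach c l true = decide (pvRunsR c l true = 0) := by
  induction l with
  | nil => simp [pvMach, pvRunsR]
  | cons x xs ih =>
    by_cases hx : x = c
    · subst hx; simpa [pvMach, pvRunsR] using ih
    · have hxb : (x == c) = false := by simpa using hx
      have h1 : pvMach c (x :: xs) true = pvMach c xs false := by simp [pvMach, hxb]
      have h2 : pvRunsR c (x :: xs) true = pvRunsR c xs false := by simp [pvRunsR, hx]
      rw [h1, h2, pvMach_false]
      by_cases hm : c ∈ xs
      · have : pvRunsR c xs false ≠ 0 := fun h0 => ((pvRunsR_false_eq_zero_iff c xs).mp h0) hm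
        simp [List.contains_eq_mem, hm, this]
      · simp [List.contains_eq_mem, hm, (pvRunsR_false_eq_zero_iff c xs).mpr hm]

-- A's scan counts: it succeeds iff the character c has at most one run
theorem pvScan_eq_runs (s : List Char) (c : Char) (poss : Int) :
    pvScanA s [c] (PySem.List.pyRange (PySem.Chars.find s [c]) ((s.length : Int) - 1)) true poss
      = if pvRunsR c s false ≤ 1 then poss else 0 := by
  by_cases hf : PySem.Chars.find s [c] = -1
  · have hnm : c ∉ s := by
      have := (PySem.Chars.find_eq_neg_one_iff s [c]).mp hf
      rw [List.singleton_infix_iff] at this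
      exact this
    have h0 : PySem.Chars.find s [c] = ((0 : Nat) : Int) - 1 := by rw [hf]; simp
    rw [h0, pvScanA_eq_mach s c 0 (by omega)]
    have hr : pvRunsR c s false = 0 := (pvRunsR_false_eq_zero_iff c s).mpr hnm
    simp [pvMach_of_not_mem c _ (by simpa using hnm), hr]
  · have hge : 0 ≤ PySem.Chars.find s [c] := by
      have := PySem.Chars.neg_one_le_find s [c]
      omega
    set i := PySem.Chars.find s [c] with hi
    obtain ⟨hpre, hmin⟩ := PySem.Chars.find_spec (sub := [c]) (s := s) hge
    rw [← hi] at hpre hmin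
    have hlt : i.toNat < s.length := by
      rcases hpre with ⟨t, ht⟩
      have : s.length - i.toNat = ([c] ++ t).length := by rw [ht]; rw [List.length_drop]
      have hle : i ≤ (s.length : Int) := PySem.Chars.find_le_length s [c]
      simp at this
      omega
    have hcons : s.drop i.toNat = c :: s.drop (i.toNat + 1) := by
      rcases hpre with ⟨t, ht⟩
      have htail : s.drop (i.toNat + 1) = (s.drop i.toNat).tail := (List.tail_drop ..).symm
      rw [htail, ← ht]; simp
    have hnotake : c ∉ s.take i.toNat := by
      intro hmem
      obtain ⟨i', hi'lt, hi'⟩ := List.getElem_of_mem hmem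
      have hi'lt2 : i' < i.toNat := by
        have := List.length_take_le i.toNat s
        omega
      have hi's : s[i']'(by omega) = c := by
        rw [List.getElem_take] at hi'
        exact hi'
      apply hmin i' hi'lt2
      refine ⟨(s.drop i').tail, ?_⟩
      have : s.drop i' = s[i']'(by omega) :: s.drop (i' + 1) := (List.getElem_cons_drop (by omega)).symm
      rw [this, hi's]
      simp
    have hruns : pvRunsR c s false = 1 + pvRunsR c (s.drop (i.toNat + 1)) true := by
      conv_lhs => rw [← List.take_append_drop i.toNat s]
      rw [pvRunsR_prefix c _ _ hnotake, hcons]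
      simp [pvRunsR]
    have hj : i = ((i.toNat + 1 : Nat) : Int) - 1 := by omega
    rw [hj, pvScanA_eq_mach s c (i.toNat + 1) (by omega), pvMach_true_runs, hruns]
    by_cases hz : pvRunsR c (s.drop (i.toNat + 1)) true = 0
    · simp [hz]
    · have : ¬ (1 + pvRunsR c (s.drop (i.toNat + 1)) true ≤ 1) := by omega
      simp [hz, this]

-- two satisfying positions give countP ≥ 2
theorem pvCountP_two {α : Type} (p : α → Bool) (l : List α) (i j : Nat) (hij : i < j)
    (x y : α) (hx : l[i]? = some x) (hy : l[j]? = some y) (hpx : p x) (hpy : p y) :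
    2 ≤ l.countP p := by
  have hjl : j < l.length := (List.getElem?_eq_some_iff.mp hy).1
  have hsplit : l = l.take j ++ l.drop j := (List.take_append_drop j l).symm
  have hxt : x ∈ l.take j := by
    have : (l.take j)[i]? = some x := by
      rw [List.getElem?_take_of_lt hij]; exact hx
    exact List.mem_of_getElem? this
  have hyd : y ∈ l.drop j := by
    have : (l.drop j)[0]? = some y := by
      rw [List.getElem?_drop]; simpa using hy
    exact List.mem_of_getElem? this
  have h1 : 1 ≤ (l.take j).countP p := List.countP_pos_iff.mpr ⟨x, hxt, hpx⟩
  have h2 : 1 ≤ (l.drop j).countP p := List.countP_pos_iff.mpr ⟨y, hyd, hpy⟩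
  calc 2 ≤ (l.take j).countP p + (l.drop j).countP p := by omega
  _ = l.countP p := by rw [← List.countP_append, List.take_append_drop]

-- a c ... non-c ... c pattern forces at least two runs
theorem pvTwoRuns_of_indices (c d : Char) (l : List Char) (i j k : Nat)
    (hij : i < j) (hjk : j < k) (hi : l[i]? = some c) (hj : l[j]? = some d)
    (hd : d ≠ c) (hk : l[k]? = some c) : 2 ≤ pvRunsR c l false := by
  have hjl : j < l.length := (List.getElem?_eq_some_iff.mp hj).1
  have hkl : k < l.length := (List.getElem?_eq_some_iff.mp hk).1
  have h1 : c ∈ l.take j := by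
    have : (l.take j)[i]? = some c := by
      rw [List.getElem?_take_of_lt hij]; exact hi
    exact List.mem_of_getElem? this
  have h2 : c ∈ l.drop (j + 1) := by
    have : (l.drop (j + 1))[k - (j + 1)]? = some c := by
      rw [List.getElem?_drop]
      rw [show j + 1 + (k - (j + 1)) = k by omega]
      exact hk
    exact List.mem_of_getElem? this
  have hlj : l[j]'hjl = d := by
    have := List.getElem?_eq_getElem hjl
    rw [this] at hj
    exact (Option.some.injEq _ _).mp hj
  have hcons : l.drop j = d :: l.drop (j + 1) := by
    rw [← hlj]
    exact (List.getElem_cons_drop hjl).symm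
  have hdropruns : ∀ f : Bool, pvRunsR c (l.drop j) f = pvRunsR c (l.drop (j + 1)) false := by
    intro f
    rw [hcons]
    simp [pvRunsR, hd]
  calc 2 = 1 + 1 := rfl
  _ ≤ pvRunsR c (l.take j) false + pvRunsR c (l.drop j) (pvLastFlag c (l.take j) false) := by
      have a1 := pvRunsR_pos_of_mem c _ h1
      have a2 := pvRunsR_pos_of_mem c _ h2
      rw [hdropruns]
      omega
  _ = pvRunsR c l false := by rw [← pvRunsR_append, List.take_append_drop]

theorem pvTwoRuns_last (c : Char) (p m0 m1 m2 : List Char)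
    (hlast : p.getLast? = some c) (d : Char) (hd : d ∈ p) (hdc : d ≠ c) :
    2 ≤ pvRunsR c (m0 ++ p ++ m1 ++ p ++ m2) false := by
  have hpne : p ≠ [] := by rintro rfl; simp at hlast
  have hplen : 1 ≤ p.length := List.length_pos_iff.mpr hpne
  obtain ⟨t, htlt, htd⟩ := List.getElem_of_mem hd
  have hpt : p[t]? = some d := by rw [List.getElem?_eq_getElem htlt, htd]
  have hplast : p[p.length - 1]? = some c := by
    rw [← List.getLast?_eq_getElem?]; exact hlast
  have htne : t ≠ p.length - 1 := by
    intro h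
    apply hdc
    rw [h] at hpt
    rw [hplast] at hpt
    exact (Option.some.injEq _ _).mp hpt.symm
  have htlt2 : t < p.length - 1 := by omega
  set l := m0 ++ p ++ m1 ++ p ++ m2 with hl
  have hl2 : l = m0 ++ (p ++ (m1 ++ (p ++ m2))) := by rw [hl]; simp [List.append_assoc]
  have hget : ∀ (n : Nat) (h : n < p.length),
      l[m0.length + p.length + m1.length + n]? = p[n]? ∧ l[m0.length + n]? = p[n]? := by
    intro n hn
    constructor
    · rw [hl2, List.getElem?_append_right (by omega), List.getElem?_append_right (by omega)]
      rw [List.getElem?_append_right (by omega)]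
      rw [List.getElem?_append_left (by omega)]
      congr 1
      omega
    · rw [hl2, List.getElem?_append_right (by omega), List.getElem?_append_left (by omega)]
      congr 1
      omega
  refine pvTwoRuns_of_indices c d l (m0.length + (p.length - 1))
    (m0.length + p.length + m1.length + t) (m0.length + p.length + m1.length + (p.length - 1))
    (by omega) (by omega) ?_ ?_ hdc ?_
  · rw [(hget (p.length - 1) (by omega)).2]; exact hplast
  · rw [(hget t htlt).1]; exact hpt
  · rw [(hget (p.length - 1) (by omega)).1]; exact hplast

theorem pvTwoRuns_first (c d : Char) (p m0 m1 m2 : List Char)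
    (hhead : p.head? = some c) (hlast : p.getLast? = some d) (hdc : d ≠ c) :
    2 ≤ pvRunsR c (m0 ++ p ++ m1 ++ p ++ m2) false := by
  have hpne : p ≠ [] := by rintro rfl; simp at hlast
  have hplen : 1 ≤ p.length := List.length_pos_iff.mpr hpne
  have hp0 : p[0]? = some c := by rw [← List.head?_eq_getElem?]; exact hhead
  have hplast : p[p.length - 1]? = some d := by
    rw [← List.getLast?_eq_getElem?]; exact hlast
  have hplen2 : 2 ≤ p.length := by
    rcases Nat.lt_or_ge p.length 2 with h | h
    · exfalso
      have h1 : p.length = 1 := by omega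
      rw [h1] at hplast
      simp at hplast
      rw [hplast] at hp0
      exact hdc ((Option.some.injEq _ _).mp hp0)
    · exact h
  set l := m0 ++ p ++ m1 ++ p ++ m2 with hl
  have hl2 : l = m0 ++ (p ++ (m1 ++ (p ++ m2))) := by rw [hl]; simp [List.append_assoc]
  have hget : ∀ (n : Nat) (h : n < p.length),
      l[m0.length + p.length + m1.length + n]? = p[n]? ∧ l[m0.length + n]? = p[n]? := by
    intro n hn
    constructor
    · rw [hl2, List.getElem?_append_right (by omega), List.getElem?_append_right (by omega)]
      rw [List.getElem?_append_right (by omega)]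
      rw [List.getElem?_append_left (by omega)]
      congr 1
      omega
    · rw [hl2, List.getElem?_append_right (by omega), List.getElem?_append_left (by omega)]
      congr 1
      omega
  refine pvTwoRuns_of_indices c d l (m0.length + 0) (m0.length + (p.length - 1))
    (m0.length + p.length + m1.length + 0) (by omega) (by omega) ?_ ?_ hdc ?_
  · rw [(hget 0 (by omega)).2]; exact hp0
  · rw [(hget (p.length - 1) (by omega)).2]; exact hplast
  · rw [(hget 0 (by omega)).1]; exact hp0

theorem pvGetD_or {α : Type} (o o' : Option α) (d : α) : (o.or o').getD d = o.getD (o'.getD d) := by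
  cases o <;> cases o' <;> simp

theorem pvAbe_eq (al : List Char) (l : List String) : ∀ (cna : Int) (b e : String),
    pvAbe al l (cna, b, e) =
      (cna + ((l.filter (fun w => pvMixed w)).length : Int),
       (((l.filter (fun w => pvMixed w)).reverse.find? (fun w => pvLastIs w al)).getD b),
       (((l.filter (fun w => pvMixed w)).reverse.find? (fun w => !pvLastIs w al && pvFirstIs w al)).getD e)) := by
  induction l with
  | nil => intro cna b e; simp [pvAbe]
  | cons i rest ih =>
    intro cna b e
    by_cases hm : pvMixed i = true
    · have hfilter : (i :: rest).filter (fun w => pvMixed w)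
          = i :: rest.filter (fun w => pvMixed w) := by
        simp [hm]
      have hstep : pvAbe al (i :: rest) (cna, b, e)
          = pvAbe al rest (cna + 1, if pvLastIs i al then i else b,
              if !pvLastIs i al && pvFirstIs i al then i else e) := by
        show (if (PySem.Set.ofList i.toList).length != 1 then _ else _) = _
        rw [if_pos (by simpa [pvMixed] using hm)]
        cases hti : i.toList with
        | nil =>
          have hl : pvLastIs i al = false := by simp [pvLastIs, hti, PySem.List.pyGet?]
          have hf : pvFirstIs i al = false := by simp [pvFirstIs, hti, PySem.List.pyGet?, PySem.List.pyIdx?]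
          rw [hl, hf]
          simp [PySem.List.pyGet?]
        | cons x xs =>
          obtain ⟨lastc, hg⟩ : ∃ c, PySem.List.pyGet? (x :: xs) (-1) = some c := by
            simp [PySem.List.pyGet?, PySem.List.pyIdx?]
          have hl : pvLastIs i al = ([lastc] == al) := by simp [pvLastIs, hti, hg]
          have hf : pvFirstIs i al = ([x] == al) := by simp [pvFirstIs, hti, PySem.List.pyGet?, PySem.List.pyIdx?]
          rw [hl, hf, hg]
          by_cases h1 : [lastc] = al
          · simp [h1]
          · by_cases h2 : [x] = al
            · simp [h1, h2, PySem.List.pyGet?, PySem.List.pyIdx?]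
            · simp [h1, h2, PySem.List.pyGet?, PySem.List.pyIdx?]
      rw [hstep, ih]
      rw [hfilter]
      simp only [List.length_cons, List.reverse_cons, List.find?_append, pvGetD_or,
        Prod.mk.injEq]
      refine ⟨by push_cast; ring, ?_, ?_⟩
      · congr 1
        cases hp : pvLastIs i al <;> simp [List.find?, hp]
      · congr 1
        cases hp : pvLastIs i al <;> cases hq : pvFirstIs i al <;> simp [List.find?, hp, hq]
    · have hm' : pvMixed i = false := by simpa using hm
      have hfilter : (i :: rest).filter (fun w => pvMixed w)
          = rest.filter (fun w => pvMixed w) := by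
        simp [hm']
      have hstep : pvAbe al (i :: rest) (cna, b, e) = pvAbe al rest (cna, b, e) := by
        show (if (PySem.Set.ofList i.toList).length != 1 then _ else _) = _
        rw [show ((PySem.Set.ofList i.toList).length != 1) = false by simpa [pvMixed] using hm']
        simp
      rw [hstep, ih, hfilter]

theorem pvIdxScan_eq (al : List Char) (l : List (Int × String)) : ∀ (cna bi ei : Int),
    pvIdxScan al l (cna, bi, ei) =
      (cna + ((l.filter (fun p => pvMixed p.2)).length : Int),
       ((((l.filter (fun p => pvMixed p.2)).reverse.find? (fun p => pvLastIs p.2 al)).map (·.1)).getD bi),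
       ((((l.filter (fun p => pvMixed p.2)).reverse.find? (fun p => !pvLastIs p.2 al && pvFirstIs p.2 al)).map (·.1)).getD ei)) := by
  induction l with
  | nil => intro cna bi ei; simp [pvIdxScan]
  | cons pr rest ih =>
    obtain ⟨j, w⟩ := pr
    intro cna bi ei
    by_cases hm : pvMixed w = true
    · have hfilter : ((j, w) :: rest).filter (fun p => pvMixed p.2)
          = (j, w) :: rest.filter (fun p => pvMixed p.2) := by
        simp [hm]
      have hstep : pvIdxScan al ((j, w) :: rest) (cna, bi, ei)
          = pvIdxScan al rest (cna + 1, if pvLastIs w al then j else bi,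
              if !pvLastIs w al && pvFirstIs w al then j else ei) := by
        show (if (PySem.Set.ofList w.toList).length != 1 then _ else _) = _
        rw [if_pos (by simpa [pvMixed] using hm)]
        cases hti : w.toList with
        | nil =>
          have hl : pvLastIs w al = false := by simp [pvLastIs, hti, PySem.List.pyGet?]
          have hf : pvFirstIs w al = false := by simp [pvFirstIs, hti, PySem.List.pyGet?, PySem.List.pyIdx?]
          rw [hl, hf]
          simp [PySem.List.pyGet?]
        | cons x xs =>
          obtain ⟨lastc, hg⟩ : ∃ c, PySem.List.pyGet? (x :: xs) (-1) = some c := by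
            simp [PySem.List.pyGet?, PySem.List.pyIdx?]
          have hl : pvLastIs w al = ([lastc] == al) := by simp [pvLastIs, hti, hg]
          have hf : pvFirstIs w al = ([x] == al) := by simp [pvFirstIs, hti, PySem.List.pyGet?, PySem.List.pyIdx?]
          rw [hl, hf, hg]
          by_cases h1 : [lastc] = al
          · simp [h1]
          · by_cases h2 : [x] = al
            · simp [h1, h2, PySem.List.pyGet?, PySem.List.pyIdx?]
            · simp [h1, h2, PySem.List.pyGet?, PySem.List.pyIdx?]
      rw [hstep, ih]
      rw [hfilter]
      simp only [List.length_cons, List.reverse_cons, List.find?_append, pvGetD_or,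
        Option.map_or, Prod.mk.injEq]
      refine ⟨by push_cast; ring, ?_, ?_⟩
      · congr 1
        cases hp : pvLastIs w al <;> simp [List.find?, hp]
      · congr 1
        cases hp : pvLastIs w al <;> cases hq : pvFirstIs w al <;> simp [List.find?, hp, hq]
    · have hm' : pvMixed w = false := by simpa using hm
      have hfilter : ((j, w) :: rest).filter (fun p => pvMixed p.2)
          = rest.filter (fun p => pvMixed p.2) := by
        simp [hm']
      have hstep : pvIdxScan al ((j, w) :: rest) (cna, bi, ei) = pvIdxScan al rest (cna, bi, ei) := by
        show (if (PySem.Set.ofList w.toList).length != 1 then _ else _) = _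
        rw [show ((PySem.Set.ofList w.toList).length != 1) = false by simpa [pvMixed] using hm']
        simp
      rw [hstep, ih, hfilter]

theorem pvFind?_map {α β : Type} (f : α → β) (q : β → Bool) (l : List α) :
    (l.map f).find? q = (l.find? (fun x => q (f x))).map f := by
  induction l with
  | nil => rfl
  | cons x xs ih =>
    by_cases h : q (f x)
    · simp [List.find?, h]
    · have h' : q (f x) = false := by simpa using h
      simp [List.find?, h', ih]

theorem pvJoin_nil (ps : List (List Char)) : PySem.Chars.join [] ps = ps.flatten := by
  induction ps with
  | nil => rfl
  | cons p ps ih =>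
    cases ps with
    | nil => simp [PySem.Chars.join, List.intercalate]
    | cons q r =>
      simp only [PySem.Chars.join, List.intercalate] at ih ⊢
      simp [List.intersperse] at ih ⊢
      exact ih

theorem pvFoldl_append (l : List String) (init : List Char) :
    l.foldl (fun acc i => acc ++ i.toList) init = init ++ PySem.Chars.join [] (l.map (·.toList)) := by
  rw [pvJoin_nil]
  induction l generalizing init with
  | nil => simp
  | cons i rest ih => simp [List.foldl_cons, ih]


theorem pvPyGet_neg_one {α : Type} (l : List α) : PySem.List.pyGet? l (-1) = l.getLast? := by
  cases l with
  | nil => simp [PySem.List.pyGet?, PySem.List.pyIdx?]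
  | cons x xs =>
    simp only [PySem.List.pyGet?, PySem.List.pyIdx?]
    rw [List.getLast?_eq_getElem?]
    rw [show (if -((x :: xs).length:Int) ≤ -1 then some ((x :: xs).length - ((-(-1):Int)).toNat) else none) = some xs.length from by rw [if_pos (by simp)]; simp]
    simp

theorem pvPyGet_zero {α : Type} (l : List α) : PySem.List.pyGet? l 0 = l.head? := by
  cases l with
  | nil => simp [PySem.List.pyGet?, PySem.List.pyIdx?]
  | cons x xs => simp [PySem.List.pyGet?, PySem.List.pyIdx?]

theorem pvLastIs_iff (w : String) (c : Char) :
    pvLastIs w [c] = true ↔ w.toList.getLast? = some c := by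
  unfold pvLastIs
  rw [pvPyGet_neg_one]
  cases h : w.toList.getLast? with
  | none => simp
  | some d =>
    constructor
    · intro hb
      simp only at hb
      have : d = c := by
        have := (beq_iff_eq).mp hb
        simpa using this
      rw [this]
    · intro hs
      have : d = c := by simpa using hs
      subst this
      simp

theorem pvFirstIs_iff (w : String) (c : Char) :
    pvFirstIs w [c] = true ↔ w.toList.head? = some c := by
  unfold pvFirstIs
  rw [pvPyGet_zero]
  cases h : w.toList.head? with
  | none => simp
  | some d =>
    constructor
    · intro hb
      simp only at hb
      have : d = c := by
        have := (beq_iff_eq).mp hb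
        simpa using this
      rw [this]
    · intro hs
      have : d = c := by simpa using hs
      subst this
      simp

theorem pvLastIs_ne_of_false (w : String) (c : Char) (hne : w.toList ≠ [])
    (h : pvLastIs w [c] = false) : ∃ d, w.toList.getLast? = some d ∧ d ≠ c := by
  cases hg : w.toList.getLast? with
  | none => exact absurd (List.getLast?_eq_none_iff.mp hg) hne
  | some d =>
    refine ⟨d, rfl, ?_⟩
    rintro rfl
    rw [(pvLastIs_iff w d).mpr hg] at h
    simp at h

theorem pvNe_empty_of_lastIs (w : String) (al : List Char) (h : pvLastIs w al = true) :
    w ≠ "" := by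
  intro hw
  subst hw
  simp [pvLastIs, PySem.List.pyGet?, PySem.List.pyIdx?] at h

theorem pvNe_empty_of_firstIs (w : String) (al : List Char) (h : pvFirstIs w al = true) :
    w ≠ "" := by
  intro hw
  subst hw
  simp [pvFirstIs, PySem.List.pyGet?, PySem.List.pyIdx?] at h

theorem pvLastIs_false_of_len (w : String) (al : List Char) (h : al.length ≠ 1) :
    pvLastIs w al = false := by
  unfold pvLastIs
  cases hg : PySem.List.pyGet? w.toList (-1) with
  | none => rfl
  | some d =>
    rw [beq_eq_false_iff_ne]
    intro hc
    apply h
    rw [← hc]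
    rfl

theorem pvFirstIs_false_of_len (w : String) (al : List Char) (h : al.length ≠ 1) :
    pvFirstIs w al = false := by
  unfold pvFirstIs
  cases hg : PySem.List.pyGet? w.toList 0 with
  | none => rfl
  | some d =>
    rw [beq_eq_false_iff_ne]
    intro hc
    apply h
    rw [← hc]
    rfl

theorem pvMixed_exists_ne (w : String) (c : Char) (hm : pvMixed w = true)
    (hc : c ∈ w.toList) : ∃ d ∈ w.toList, d ≠ c := by
  by_contra hall
  push_neg at hall
  have hsub : PySem.Set.ofList w.toList ⊆ [c] := by
    intro x hx
    have hxw : x ∈ w.toList := (PySem.Set.mem_ofList _ _).mp hx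
    have := hall x hxw
    simp [this]
  have hnd : (PySem.Set.ofList w.toList).Nodup := PySem.Set.nodup_ofList _
  have hle : (PySem.Set.ofList w.toList).length ≤ 1 := by
    have := (hnd.subperm hsub).length_le
    simpa using this
  have hcmem : c ∈ PySem.Set.ofList w.toList := (PySem.Set.mem_ofList _ _).mpr hc
  have hge : 1 ≤ (PySem.Set.ofList w.toList).length :=
    List.length_pos_iff.mpr (List.ne_nil_of_mem hcmem)
  apply absurd hm
  simp only [pvMixed, bne_iff_ne, ne_eq, Bool.not_eq_true, Bool.not_not]
  omega

theorem pvFilter_map {α β : Type} (f : α → β) (q : β → Bool) (m : List α) :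
    (m.filter (fun p => q (f p))).map f = (m.map f).filter q := by
  induction m with
  | nil => rfl
  | cons x xs ih =>
    by_cases h : q (f x)
    · simp [List.filter_cons, h, ih]
    · have h' : q (f x) = false := by simpa using h
      simp [List.filter_cons, h', ih]

theorem pvEnumFilterNe {α : Type} (l : List α) : ∀ (s : Int) (n : Nat),
    ((PySem.List.enumerate l s).filter (fun p => !(p.1 == s + (n : Int)))).map (·.2)
      = l.eraseIdx n := by
  induction l with
  | nil => intro s n; simp [PySem.List.enumerate_nil]
  | cons x xs ih =>
    intro s n
    rw [PySem.List.enumerate_cons]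
    cases n with
    | zero =>
      have hhead : (!(((s, x) : Int × α).1 == s + ((0 : Nat) : Int))) = false := by simp
      simp only [List.filter_cons, hhead, Bool.false_eq_true, if_false, List.eraseIdx_cons_zero]
      have hall : (PySem.List.enumerate xs (s + 1)).filter (fun p => !(p.1 == s + ((0 : Nat) : Int))) = PySem.List.enumerate xs (s + 1) := by
        apply List.filter_eq_self.mpr
        intro p hp
        obtain ⟨k, hk, rfl⟩ := (PySem.List.mem_enumerate_iff _ _ _).mp hp
        simp only [bne_iff_ne] at *
        simp
        omega
      rw [hall]
      rw [show ((PySem.List.enumerate xs (s+1)).map (·.2)) = xs from PySem.List.map_snd_enumerate xs (s+1)]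
    | succ m =>
      have hhead : (!(((s, x) : Int × α).1 == s + ((m + 1 : Nat) : Int))) = true := by
        simp
        omega
      simp only [List.filter_cons, hhead, if_true, List.eraseIdx_cons_succ, List.map_cons]
      have harg : ∀ p : Int × α, (!(p.1 == s + ((m + 1 : Nat) : Int))) = (!(p.1 == (s + 1) + (m : Int))) := by
        intro p
        have : s + ((m + 1 : Nat) : Int) = (s + 1) + (m : Int) := by push_cast; ring
        rw [this]
      rw [List.filter_congr (fun p _ => harg p)]
      rw [ih (s + 1) m]

theorem pvCount_eraseIdx {α : Type} [DecidableEq α] (l : List α) (n : Nat) (v : α)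
    (h : l[n]? = some v) : l.count v = (l.eraseIdx n).count v + 1 := by
  have hn : n < l.length := (List.getElem?_eq_some_iff.mp h).1
  have hv : l[n]'hn = v := by
    have := List.getElem?_eq_getElem hn
    rw [this] at h
    exact (Option.some.injEq _ _).mp h
  have hsplit : l = l.take n ++ l[n]'hn :: l.drop (n + 1) := by
    conv_lhs => rw [← List.take_append_drop n l]
    rw [List.getElem_cons_drop hn]
  rw [List.eraseIdx_eq_take_drop_succ]
  conv_lhs => rw [hsplit]
  rw [List.count_append, List.count_cons, List.count_append, hv]
  simp
  omega

theorem pvUnique_index {α : Type} [DecidableEq α] (l : List α) (v : α)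
    (hc : l.count v = 1) (i j : Nat) (hi : l[i]? = some v) (hj : l[j]? = some v) : i = j := by
  by_contra hne
  have h2 : 2 ≤ l.count v := by
    rcases Nat.lt_or_ge i j with h | h
    · have h2' := pvCountP_two (fun x => x == v) l i j h v v hi hj (by simp) (by simp)
      rwa [← List.count_eq_countP] at h2'
    · have hlt : j < i := by omega
      have h2' := pvCountP_two (fun x => x == v) l j i hlt v v hj hi (by simp) (by simp)
      rwa [← List.count_eq_countP] at h2'
  omega

theorem pvErase_eq_filter {α : Type} [DecidableEq α] (l : List α) (v : α)
    (h : l.count v ≤ 1) : l.erase v = l.filter (fun w => !(w == v)) := by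
  induction l with
  | nil => rfl
  | cons x xs ih =>
    by_cases hx : x = v
    · subst hx
      have hxs : x ∉ xs := by
        rw [List.count_cons_self] at h
        have : xs.count x = 0 := by omega
        exact (List.count_eq_zero).mp this
      rw [List.erase_cons_head]
      rw [List.filter_cons]
      simp only [beq_self_eq_true, Bool.not_true, Bool.false_eq_true, if_false]
      rw [List.filter_eq_self.mpr]
      intro w hw
      simp only [Bool.not_eq_true']
      rw [beq_eq_false_iff_ne]
      rintro rfl
      exact hxs hw
    · rw [List.erase_cons_tail (by simpa using hx)]
      rw [List.filter_cons]
      have hcx : (!(x == v)) = true := by simpa using hx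
      rw [if_pos hcx]
      rw [ih]
      rw [List.count_cons_of_ne hx] at h
      exact h

theorem pvCount_filter {α : Type} [DecidableEq α] (l : List α) (v : α) (p : α → Bool)
    (hp : p v = true) : (l.filter p).count v = l.count v := by
  induction l with
  | nil => rfl
  | cons x xs ih =>
    by_cases hx : x = v
    · subst hx
      rw [List.filter_cons, if_pos hp, List.count_cons_self, List.count_cons_self, ih]
    · rw [List.filter_cons, List.count_cons_of_ne hx]
      split
      · rw [List.count_cons_of_ne hx, ih]
      · rw [ih]

theorem pvCountP_split {α : Type} [DecidableEq α] (l : List α) (p : α → Bool) (v : α)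
    (hp : p v = true) :
    l.countP p = l.count v + l.countP (fun x => p x && !(x == v)) := by
  induction l with
  | nil => rfl
  | cons x xs ih =>
    rw [List.countP_cons, List.countP_cons, List.count_cons]
    by_cases hx : x = v
    · subst hx
      simp [hp, ih]
      omega
    · have hxv : (x == v) = false := by simpa using hx
      by_cases hpx : p x = true
      · simp [hpx, hxv, ih]
        omega
      · have : p x = false := by simpa using hpx
        simp [this, hxv, ih]



theorem pvFinish (s : List Char) (c : Char) (f : Int) (hf : f ≠ 0) :
    (if pvScanA s [c] (PySem.List.pyRange (PySem.Chars.find s [c]) ((s.length : Int) - 1)) true f = 0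
     then ((0:Int), "")
     else (pvScanA s [c] (PySem.List.pyRange (PySem.Chars.find s [c]) ((s.length : Int) - 1)) true f, String.ofList s))
    = if ([c] : List Char).length = 1 ∧ pvRunsB s [c] > 1 then ((0:Int), "")
      else (f, String.ofList s) := by
  rw [pvScan_eq_runs, pvRunsB_eq]
  by_cases hr : pvRunsR c s false ≤ 1
  · rw [if_pos hr, if_neg hf, if_neg (by simp; omega)]
  · rw [if_neg hr, if_pos rfl, if_pos ⟨by simp, by omega⟩]

theorem pvFinishNe (s : List Char) (al : List Char) (hL : al.length ≠ 1) (f : Int) (hf : f ≠ 0) :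
    (if pvScanA s al (PySem.List.pyRange (PySem.Chars.find s al) ((s.length : Int) - 1)) true f = 0
     then ((0:Int), "")
     else (pvScanA s al (PySem.List.pyRange (PySem.Chars.find s al) ((s.length : Int) - 1)) true f, String.ofList s))
    = if al.length = 1 ∧ pvRunsB s al > 1 then ((0:Int), "")
      else (f, String.ofList s) := by
  rw [pvScanA_of_len_ne_one _ _ hL, if_neg hf, if_neg (fun h => hL h.1)]

theorem pvFinishDupA (s : List Char) (c : Char) (f : Int) (h2 : 2 ≤ pvRunsR c s false) :
    (if pvScanA s [c] (PySem.List.pyRange (PySem.Chars.find s [c]) ((s.length : Int) - 1)) true f = 0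
     then ((0:Int), "")
     else (pvScanA s [c] (PySem.List.pyRange (PySem.Chars.find s [c]) ((s.length : Int) - 1)) true f, String.ofList s))
    = ((0:Int), "") := by
  rw [pvScan_eq_runs]
  have hr : ¬ pvRunsR c s false ≤ 1 := by omega
  rw [if_neg hr, if_pos rfl]

theorem pvFinishDupB (s : List Char) (c : Char) (f : Int) (h2 : 2 ≤ pvRunsR c s false) :
    (if ([c] : List Char).length = 1 ∧ pvRunsB s [c] > 1 then ((0:Int), "")
     else (f, String.ofList s)) = ((0:Int), "") := by
  rw [if_pos ⟨by simp, by rw [pvRunsB_eq]; omega⟩]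

theorem pvMem_enum_fst_nonneg {α : Type} (l : List α) (p : Int × α)
    (hp : p ∈ PySem.List.enumerate l 0) : 0 ≤ p.1 := by
  obtain ⟨k, hk, rfl⟩ := (PySem.List.mem_enumerate_iff _ _ _).mp hp
  simp

theorem pvMidB_keep (subsl : List String) (bi ei : Int) (hbi : bi < 0) (hei : ei < 0) :
    ((PySem.List.enumerate subsl 0).filter (fun p => !(p.1 == bi) && !(p.1 == ei))).map (·.2)
      = subsl := by
  rw [List.filter_eq_self.mpr, PySem.List.map_snd_enumerate]
  intro p hp
  have h0 := pvMem_enum_fst_nonneg subsl p hp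
  have hb : (p.1 == bi) = false := by rw [beq_eq_false_iff_ne]; omega
  have he : (p.1 == ei) = false := by rw [beq_eq_false_iff_ne]; omega
  rw [hb, he]
  rfl

theorem pvMidB_erase_b (subsl : List String) (k : Nat) (ei : Int) (hei : ei < 0) :
    ((PySem.List.enumerate subsl 0).filter (fun p => !(p.1 == ((k : Nat) : Int)) && !(p.1 == ei))).map (·.2)
      = subsl.eraseIdx k := by
  rw [List.filter_congr (q := fun p => !(p.1 == (0 : Int) + (k : Int)))]
  · exact pvEnumFilterNe subsl 0 k
  · intro p hp
    have := pvMem_enum_fst_nonneg subsl p hp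
    have hne : (p.1 == ei) = false := by rw [beq_eq_false_iff_ne]; omega
    rw [hne]
    simp

theorem pvMidB_erase_e (subsl : List String) (k : Nat) (bi : Int) (hbi : bi < 0) :
    ((PySem.List.enumerate subsl 0).filter (fun p => !(p.1 == bi) && !(p.1 == ((k : Nat) : Int)))).map (·.2)
      = subsl.eraseIdx k := by
  rw [List.filter_congr (q := fun p => !(p.1 == (0 : Int) + (k : Int)))]
  · exact pvEnumFilterNe subsl 0 k
  · intro p hp
    have := pvMem_enum_fst_nonneg subsl p hp
    have hne : (p.1 == bi) = false := by rw [beq_eq_false_iff_ne]; omega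
    rw [hne]
    simp

theorem pvIdx_iff_value (subsl : List String) (k : Nat) (v : String)
    (hk : subsl[k]? = some v) (hc : subsl.count v = 1) (p : Int × String)
    (hp : p ∈ PySem.List.enumerate subsl 0) : (p.1 == ((k : Nat) : Int)) = (p.2 == v) := by
  obtain ⟨m, hm, rfl⟩ := (PySem.List.mem_enumerate_iff _ _ _).mp hp
  simp only [zero_add]
  by_cases hmk : m = k
  · subst hmk
    have : subsl[m] = v := by
      have := List.getElem?_eq_getElem hm
      rw [this] at hk
      exact (Option.some.injEq _ _).mp hk
    simp [this]
  · have hne2 : subsl[m] ≠ v := by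
      intro hv
      apply hmk
      exact pvUnique_index subsl v hc m k (by rw [List.getElem?_eq_getElem hm, hv]) hk
    have h1 : (((m : Nat) : Int) == ((k : Nat) : Int)) = false := by
      simp only [beq_eq_false_iff_ne]
      intro hc2
      exact hmk (by exact_mod_cast hc2)
    have h2 : (subsl[m] == v) = false := by simpa using hne2
    rw [h1, h2]

theorem pvMidB_value_one (subsl : List String) (k : Nat) (v : String)
    (hk : subsl[k]? = some v) (hc : subsl.count v = 1) (ei : Int) (hei : ei < 0) :
    ((PySem.List.enumerate subsl 0).filter (fun p => !(p.1 == ((k : Nat) : Int)) && !(p.1 == ei))).map (·.2)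
      = subsl.filter (fun w => !(w == v)) := by
  rw [List.filter_congr (q := fun p => !(p.2 == v))]
  · have h := pvFilter_map (fun p : Int × String => p.2) (fun w => !(w == v)) (PySem.List.enumerate subsl 0)
    rw [PySem.List.map_snd_enumerate] at h
    exact h
  · intro p hp
    have h0 := pvMem_enum_fst_nonneg subsl p hp
    have hne : (p.1 == ei) = false := by rw [beq_eq_false_iff_ne]; omega
    rw [hne, pvIdx_iff_value subsl k v hk hc p hp]
    simp

theorem pvMidB_value_one_e (subsl : List String) (k : Nat) (v : String)
    (hk : subsl[k]? = some v) (hc : subsl.count v = 1) (bi : Int) (hbi : bi < 0) :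
    ((PySem.List.enumerate subsl 0).filter (fun p => !(p.1 == bi) && !(p.1 == ((k : Nat) : Int)))).map (·.2)
      = subsl.filter (fun w => !(w == v)) := by
  rw [List.filter_congr (q := fun p => !(p.2 == v))]
  · have h := pvFilter_map (fun p : Int × String => p.2) (fun w => !(w == v)) (PySem.List.enumerate subsl 0)
    rw [PySem.List.map_snd_enumerate] at h
    exact h
  · intro p hp
    have h0 := pvMem_enum_fst_nonneg subsl p hp
    have hne : (p.1 == bi) = false := by rw [beq_eq_false_iff_ne]; omega
    rw [hne, pvIdx_iff_value subsl k v hk hc p hp]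
    simp

theorem pvMidB_value_two (subsl : List String) (kb ke : Nat) (wb we : String)
    (hkb : subsl[kb]? = some wb) (hke : subsl[ke]? = some we)
    (hcb : subsl.count wb = 1) (hce : subsl.count we = 1) :
    ((PySem.List.enumerate subsl 0).filter (fun p => !(p.1 == ((kb : Nat) : Int)) && !(p.1 == ((ke : Nat) : Int)))).map (·.2)
      = subsl.filter (fun w => !(w == wb) && !(w == we)) := by
  rw [List.filter_congr (q := fun p => !(p.2 == wb) && !(p.2 == we))]
  · have h := pvFilter_map (fun p : Int × String => p.2) (fun w => !(w == wb) && !(w == we)) (PySem.List.enumerate subsl 0)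
    rw [PySem.List.map_snd_enumerate] at h
    exact h
  · intro p hp
    rw [pvIdx_iff_value subsl kb wb hkb hcb p hp, pvIdx_iff_value subsl ke we hke hce p hp]

theorem pvErase_two (subsl : List String) (wb we : String) (hne : we ≠ wb)
    (hcb : subsl.count wb = 1) (hce : subsl.count we = 1) :
    (subsl.erase wb).erase we = subsl.filter (fun w => !(w == wb) && !(w == we)) := by
  rw [pvErase_eq_filter subsl wb (by omega)]
  rw [pvErase_eq_filter _ we (by
    rw [pvCount_filter subsl we _ (by simpa using hne)]
    omega)]
  rw [List.filter_filter]
  apply List.filter_congr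
  intro w _
  rw [Bool.and_comm]

theorem pvFlatten_decomp (mid : List String) (v : String) (hv : v ∈ mid) :
    ∃ f1 f2 : List Char, PySem.Chars.join [] (mid.map (·.toList)) = f1 ++ v.toList ++ f2 := by
  rw [pvJoin_nil]
  obtain ⟨u1, u2, rfl⟩ := List.append_of_mem hv
  refine ⟨(u1.map (·.toList)).flatten, (u2.map (·.toList)).flatten, ?_⟩
  simp



theorem pvCount_pair_le (subsl : List String) (v w : String) (hv : pvMixed v = true)
    (hw : pvMixed w = true) (hne : w ≠ v) :
    subsl.count v + subsl.count w ≤ (subsl.filter (fun x => pvMixed x)).length := by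
  rw [← List.countP_eq_length_filter]
  rw [pvCountP_split subsl (fun x => pvMixed x) v hv]
  have h2 : subsl.count w ≤ subsl.countP (fun x => pvMixed x && !(x == v)) := by
    rw [pvCountP_split subsl (fun x => pvMixed x && !(x == v)) w (by simp [hw, hne])]
    omega
  omega



theorem pvFind_facts (subsl : List String) (pred : Int × String → Bool) (pr : Int × String)
    (h : (((PySem.List.enumerate subsl 0).filter (fun p => pvMixed p.2)).reverse.find? pred) = some pr) :
    pred pr = true ∧ pvMixed pr.2 = true ∧
      ∃ k : Nat, k < subsl.length ∧ pr.1 = (k : Int) ∧ subsl[k]? = some pr.2 := by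
  have hpred := List.find?_some h
  have hmem := List.mem_of_find?_eq_some h
  rw [List.mem_reverse] at hmem
  have hmix : pvMixed pr.2 = true := by simpa using List.of_mem_filter hmem
  have hmem2 : pr ∈ PySem.List.enumerate subsl 0 := List.mem_of_mem_filter hmem
  obtain ⟨k, hk, hpr⟩ := (PySem.List.mem_enumerate_iff _ _ _).mp hmem2
  refine ⟨hpred, hmix, k, hk, ?_, ?_⟩
  · rw [hpr]; simp
  · rw [hpr, List.getElem?_eq_getElem hk]


-- ===== VERDICT (by name: the statement is the Claim_ definition above) =====
theorem mergesubsl_spec : Claim_equal_mergesubsl := by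
  intro subsl a _hdom hpre
  unfold Spec_mergesubsl mergesubsl mergesubsl_alt
  by_cases h0 : subsl.length = 0
  · simp [h0]
  · by_cases h1 : subsl.length = 1
    · simp only [if_neg h0, if_pos h1]
      by_cases hL : a.toList.length = 1
      · obtain ⟨c, hc⟩ : ∃ c, a.toList = [c] := by
          cases ha : a.toList with
          | nil => rw [ha] at hL; simp at hL
          | cons c t =>
            cases t with
            | nil => exact ⟨c, rfl⟩
            | cons _ _ => rw [ha] at hL; simp at hL
        rw [hc, pvScan_eq_runs, pvRunsB_eq]
        by_cases hr : pvRunsR c (subsl.head?.getD "").toList false ≤ 1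
        · have hx : ¬ (1 < pvRunsR c (subsl.head?.getD "").toList false) := by omega
          simp [hr, hx]
        · have hx : 1 < pvRunsR c (subsl.head?.getD "").toList false := by omega
          simp [hr, hx]
      · rw [pvScanA_of_len_ne_one _ _ hL]
        simp [hL]
        intro hlen
        exfalso
        have hx : a.toList.length = a.length := by simp
        omega
    · simp only [if_neg h0, if_neg h1]
      rw [pvAbe_eq, pvIdxScan_eq]
      simp only [zero_add]
      set al := a.toList with hal
      set cntS := List.filter (fun w => pvMixed w) subsl with hcntS
      set M := List.filter (fun p => pvMixed p.2) (PySem.List.enumerate subsl 0) with hM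
      have hMsnd : M.map (·.2) = cntS := by
        rw [hM, hcntS]
        have h := pvFilter_map (fun p : Int × String => p.2) pvMixed (PySem.List.enumerate subsl 0)
        rw [PySem.List.map_snd_enumerate] at h
        exact h
      have hlenM : M.length = cntS.length := by
        rw [← hMsnd]
        simp
      rw [hlenM]
      set Fb := M.reverse.find? (fun p => pvLastIs p.2 al) with hFb
      set Fe := M.reverse.find? (fun p => !pvLastIs p.2 al && pvFirstIs p.2 al) with hFe
      have hFbA : cntS.reverse.find? (fun w => pvLastIs w al) = Fb.map (·.2) := by
        rw [hFb, ← hMsnd, ← List.map_reverse, pvFind?_map]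
      have hFeA : cntS.reverse.find? (fun w => !pvLastIs w al && pvFirstIs w al) = Fe.map (·.2) := by
        rw [hFe, ← hMsnd, ← List.map_reverse, pvFind?_map]
      rw [hFbA, hFeA]
      by_cases hbig : ((cntS.length : Int) > 2)
      · rw [if_pos hbig, if_pos hbig]
      · rw [if_neg hbig, if_neg hbig]
        have hcnt2 : cntS.length ≤ 2 := by
          have := not_lt.mp hbig
          exact_mod_cast this
        have hf0 : (((subsl.length : Int) - (cntS.length : Int)).toNat.factorial : Int) ≠ 0 := by
          exact_mod_cast Nat.factorial_ne_zero _
        have hnestr : ¬ (("" : String) ≠ "") := fun h => h rfl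
        have hneg1 : ¬ ((-1 : Int) ≥ 0) := by omega
        by_cases hL : al.length = 1
        · obtain ⟨c, hc⟩ : ∃ c, al = [c] := by
            cases ha : al with
            | nil => rw [ha] at hL; simp at hL
            | cons c t =>
              cases t with
              | nil => exact ⟨c, rfl⟩
              | cons _ _ => rw [ha] at hL; simp at hL
          rw [hc]
          cases hFbv : Fb with
          | none =>
            cases hFev : Fe with
            | none =>
              simp only [Option.map_none, Option.getD_none]
              simp only [if_neg hnestr, if_neg hneg1]
              rw [pvFoldl_append, pvMidB_keep subsl (-1) (-1) (by omega) (by omega)]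
              simp only [String.toList_empty, List.append_nil, List.nil_append]
              exact pvFinish _ c _ hf0
            | some pe =>
              have hMfind : (((PySem.List.enumerate subsl 0).filter (fun p => pvMixed p.2)).reverse.find?
                  (fun p => !pvLastIs p.2 al && pvFirstIs p.2 al)) = some pe := by
                rw [← hM, ← hFe]; exact hFev
              obtain ⟨hprede, hmixe, ke, hke, hpe1, hpe2⟩ := pvFind_facts subsl _ pe hMfind
              have hprede' : pvLastIs pe.2 al = false ∧ pvFirstIs pe.2 al = true := by
                constructor
                · cases hx : pvLastIs pe.2 al
                  · rfl
                  · rw [hx] at hprede; simp at hprede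
                · cases hx : pvFirstIs pe.2 al
                  · rw [hx] at hprede; simp at hprede
                  · rfl
              have hene : pe.2 ≠ "" := pvNe_empty_of_firstIs _ _ hprede'.2
              have hemem : pe.2 ∈ subsl := List.mem_of_getElem? hpe2
              have hepos : 0 < subsl.count pe.2 := List.count_pos_iff.mpr hemem
              simp only [Option.map_none, Option.getD_none, Option.map_some, Option.getD_some]
              rw [hpe1]
              simp only [if_neg hnestr, if_neg hneg1, if_pos hene,
                if_pos (show ((ke : Nat) : Int) ≥ 0 by positivity)]
              rw [PySem.List.pyGet?_natCast, hpe2]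
              simp only [Option.getD_some]
              rw [PySem.List.remove?_eq_some_erase subsl pe.2 hemem]
              simp only [Option.getD_some]
              rcases Nat.lt_or_ge (subsl.count pe.2) 2 with hcount | hcount
              · have hce : subsl.count pe.2 = 1 := by omega
                rw [pvFoldl_append, pvErase_eq_filter subsl pe.2 (by omega)]
                rw [pvMidB_value_one_e subsl ke pe.2 hpe2 hce (-1) (by omega)]
                simp only [String.toList_empty, List.nil_append]
                exact pvFinish _ c _ hf0
              · -- duplicate end candidate: both arrangements keep two copies, both fail the run test
                rw [hc] at hprede'
                have hnonnil : pe.2.toList ≠ [] := by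
                  intro hnil
                  have hx := hprede'.2
                  rw [pvFirstIs_iff, hnil] at hx
                  simp at hx
                obtain ⟨d, hd, hdc⟩ := pvLastIs_ne_of_false pe.2 c hnonnil hprede'.1
                have hheade : pe.2.toList.head? = some c := by
                  rw [← pvFirstIs_iff]; exact hprede'.2
                -- A side
                have hmemA : pe.2 ∈ subsl.erase pe.2 := by
                  rw [← List.count_pos_iff, List.count_erase_self]
                  omega
                obtain ⟨f1, f2, hdec⟩ := pvFlatten_decomp (subsl.erase pe.2) pe.2 hmemA
                rw [pvFoldl_append, hdec]
                -- B side
                rw [pvMidB_erase_e subsl ke (-1) (by omega)]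
                have hmemB : pe.2 ∈ subsl.eraseIdx ke := by
                  rw [← List.count_pos_iff]
                  have := pvCount_eraseIdx subsl ke pe.2 hpe2
                  omega
                obtain ⟨g1, g2, hdecB⟩ := pvFlatten_decomp (subsl.eraseIdx ke) pe.2 hmemB
                rw [hdecB]
                have h2A : 2 ≤ pvRunsR c ("".toList ++ (f1 ++ pe.2.toList ++ f2) ++ pe.2.toList) false := by
                  have hshape : "".toList ++ (f1 ++ pe.2.toList ++ f2) ++ pe.2.toList
                      = f1 ++ pe.2.toList ++ f2 ++ pe.2.toList ++ [] := by simp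
                  rw [hshape]
                  exact pvTwoRuns_first c d pe.2.toList f1 f2 [] hheade hd hdc
                have h2B : 2 ≤ pvRunsR c ([] ++ (g1 ++ pe.2.toList ++ g2) ++ pe.2.toList) false := by
                  have hshape : [] ++ (g1 ++ pe.2.toList ++ g2) ++ pe.2.toList
                      = g1 ++ pe.2.toList ++ g2 ++ pe.2.toList ++ [] := by simp
                  rw [hshape]
                  exact pvTwoRuns_first c d pe.2.toList g1 g2 [] hheade hd hdc
                rw [pvFinishDupA _ c _ h2A, pvFinishDupB _ c _ h2B]
          | some pb =>
            have hMfindb : (((PySem.List.enumerate subsl 0).filter (fun p => pvMixed p.2)).reverse.find?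
                (fun p => pvLastIs p.2 al)) = some pb := by
              rw [← hM, ← hFb]; exact hFbv
            obtain ⟨hpredb, hmixb, kb, hkb, hpb1, hpb2⟩ := pvFind_facts subsl _ pb hMfindb
            rw [hc] at hpredb
            have hbne : pb.2 ≠ "" := pvNe_empty_of_lastIs _ _ hpredb
            have hbmem : pb.2 ∈ subsl := List.mem_of_getElem? hpb2
            have hbpos : 0 < subsl.count pb.2 := List.count_pos_iff.mpr hbmem
            have hblast : pb.2.toList.getLast? = some c := (pvLastIs_iff _ _).mp hpredb
            have hcmem : c ∈ pb.2.toList := by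
              rw [List.getLast?_eq_getElem?] at hblast
              have := List.mem_of_getElem? hblast
              exact this
            have hblast' : pb.2.toList.getLast? = some c := (pvLastIs_iff _ _).mp hpredb
            simp only [Option.map_some, Option.getD_some]
            rw [hpb1]
            rw [if_pos hbne, if_pos (show ((kb : Nat) : Int) ≥ 0 by positivity)]
            rw [PySem.List.pyGet?_natCast, hpb2]
            simp only [Option.getD_some]
            rw [PySem.List.remove?_eq_some_erase subsl pb.2 hbmem]
            simp only [Option.getD_some]
            cases hFev : Fe with
            | none =>
              simp only [Option.map_none, Option.getD_none, if_neg hnestr, if_neg hneg1]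
              rcases Nat.lt_or_ge (subsl.count pb.2) 2 with hcount | hcount
              · have hcb : subsl.count pb.2 = 1 := by omega
                rw [pvFoldl_append, pvErase_eq_filter subsl pb.2 (by omega)]
                rw [pvMidB_value_one subsl kb pb.2 hpb2 hcb (-1) (by omega)]
                simp only [String.toList_empty, List.append_nil]
                exact pvFinish _ c _ hf0
              · -- duplicate begin candidate: both arrangements keep two copies, both fail the run test
                obtain ⟨d, hd, hdc⟩ := pvMixed_exists_ne pb.2 c hmixb hcmem
                have hmemA : pb.2 ∈ subsl.erase pb.2 := by
                  rw [← List.count_pos_iff, List.count_erase_self]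
                  omega
                obtain ⟨f1, f2, hdec⟩ := pvFlatten_decomp (subsl.erase pb.2) pb.2 hmemA
                rw [pvFoldl_append, hdec]
                rw [pvMidB_erase_b subsl kb (-1) (by omega)]
                have hmemB : pb.2 ∈ subsl.eraseIdx kb := by
                  rw [← List.count_pos_iff]
                  have := pvCount_eraseIdx subsl kb pb.2 hpb2
                  omega
                obtain ⟨g1, g2, hdecB⟩ := pvFlatten_decomp (subsl.eraseIdx kb) pb.2 hmemB
                rw [hdecB]
                have h2A : 2 ≤ pvRunsR c (pb.2.toList ++ (f1 ++ pb.2.toList ++ f2) ++ "".toList) false := by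
                  have hshape : pb.2.toList ++ (f1 ++ pb.2.toList ++ f2) ++ "".toList
                      = [] ++ pb.2.toList ++ f1 ++ pb.2.toList ++ f2 := by simp
                  rw [hshape]
                  exact pvTwoRuns_last c pb.2.toList [] f1 f2 hblast' d hd hdc
                have h2B : 2 ≤ pvRunsR c (pb.2.toList ++ (g1 ++ pb.2.toList ++ g2) ++ []) false := by
                  have hshape : pb.2.toList ++ (g1 ++ pb.2.toList ++ g2) ++ ([] : List Char)
                      = [] ++ pb.2.toList ++ g1 ++ pb.2.toList ++ g2 := by simp
                  rw [hshape]
                  exact pvTwoRuns_last c pb.2.toList [] g1 g2 hblast' d hd hdc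
                rw [pvFinishDupA _ c _ h2A, pvFinishDupB _ c _ h2B]
            | some pe =>
              have hMfinde : (((PySem.List.enumerate subsl 0).filter (fun p => pvMixed p.2)).reverse.find?
                  (fun p => !pvLastIs p.2 al && pvFirstIs p.2 al)) = some pe := by
                rw [← hM, ← hFe]; exact hFev
              obtain ⟨hprede, hmixe, ke, hke, hpe1, hpe2⟩ := pvFind_facts subsl _ pe hMfinde
              rw [hc] at hprede
              have hprede' : pvLastIs pe.2 [c] = false ∧ pvFirstIs pe.2 [c] = true := by
                constructor
                · cases hx : pvLastIs pe.2 [c]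
                  · rfl
                  · rw [hx] at hprede; simp at hprede
                · cases hx : pvFirstIs pe.2 [c]
                  · rw [hx] at hprede; simp at hprede
                  · rfl
              have hene : pe.2 ≠ "" := pvNe_empty_of_firstIs _ _ hprede'.2
              have heb : pe.2 ≠ pb.2 := by
                intro h
                have hx := hprede'.1
                rw [h, hpredb] at hx
                simp at hx
              have hemem : pe.2 ∈ subsl := List.mem_of_getElem? hpe2
              have hepos : 0 < subsl.count pe.2 := List.count_pos_iff.mpr hemem
              have hsum := pvCount_pair_le subsl pb.2 pe.2 hmixb hmixe heb
              rw [← hcntS] at hsum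
              have hcb : subsl.count pb.2 = 1 := by omega
              have hce : subsl.count pe.2 = 1 := by omega
              simp only [Option.map_some, Option.getD_some]
              rw [hpe1]
              rw [if_pos hene, if_pos (show ((ke : Nat) : Int) ≥ 0 by positivity)]
              rw [PySem.List.pyGet?_natCast, hpe2]
              simp only [Option.getD_some]
              have hememe : pe.2 ∈ subsl.erase pb.2 := by
                rw [← List.count_pos_iff, List.count_erase_of_ne heb]
                omega
              rw [PySem.List.remove?_eq_some_erase _ pe.2 hememe]
              simp only [Option.getD_some]
              rw [pvFoldl_append, pvErase_two subsl pb.2 pe.2 heb hcb hce]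
              rw [pvMidB_value_two subsl kb ke pb.2 pe.2 hpb2 hpe2 hcb hce]
              exact pvFinish _ c _ hf0
        · -- a is not a single character: no begin/end candidates, scans are vacuous
          have hFbn : Fb = none := by
            rw [hFb]
            apply List.find?_eq_none.mpr
            intro p hp
            simp [pvLastIs_false_of_len p.2 al hL]
          have hFen : Fe = none := by
            rw [hFe]
            apply List.find?_eq_none.mpr
            intro p hp
            simp [pvFirstIs_false_of_len p.2 al hL]
          rw [hFbn, hFen]
          simp only [Option.map_none, Option.getD_none]
          simp only [if_neg hnestr, if_neg hneg1]
          rw [pvFoldl_append, pvMidB_keep subsl (-1) (-1) (by omega) (by omega)]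
          simp only [String.toList_empty, List.append_nil, List.nil_append]
          exact pvFinishNe _ al hL _ hf0
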